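-- pv_equiv track=rewrite | github.com/janmichael88/Leetcode_Monthly_Challenges | Dec_2021.py | canReach
-- ===== SOURCE A (Python) =====
-- from typing import List
--
-- def canReach(arr: List[int], start: int) -> bool:
--     '''
--     we also could use dfs
--     but this time we can save on space by making the node negative
--     '''
--     N = len(arr)
--     def dfs(idx):
--         #check
--         if arr[idx] == 0:
--             return True
--         arr[idx] = -arr[idx]
--         #check for neighbors
--         for neigh in [idx+arr[idx],idx-arr[idx]]:
--             if 0 <= neigh < N:
--                 if arr[neigh] >= 0:
--                     if dfs(neigh):
--                         return True
--                     else: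
--                         return False
--         return False
--
--     return dfs(0)
-- ===== SOURCE B (Python) =====
-- def canReach(arr, start):
--     # Iterative walk instead of recursion; like A it ignores `start`, always
--     # walks from index 0, and mutates arr in place (negation = visited mark).
--     n = len(arr)
--     idx = 0
--     while True:
--         if arr[idx] == 0:
--             return True
--         arr[idx] = -arr[idx]
--         v = arr[idx]
--         for cand in (idx + v, idx - v):
--             if 0 <= cand < n and arr[cand] >= 0:
--                 idx = cand
--                 break
--         else:
--             return False
-- ===== Notes on version B (the rewrite author's own statement) =====
-- stated objective: simpler
-- what changed: Replaces A's nested recursive dfs (recursion plus an inner for-loop over the two neighbours with early returns) by a flat iterative walk: one while-loop carrying a single index, committing to the first valid neighbour, no recursion and no call stack.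
import Mathlib
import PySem

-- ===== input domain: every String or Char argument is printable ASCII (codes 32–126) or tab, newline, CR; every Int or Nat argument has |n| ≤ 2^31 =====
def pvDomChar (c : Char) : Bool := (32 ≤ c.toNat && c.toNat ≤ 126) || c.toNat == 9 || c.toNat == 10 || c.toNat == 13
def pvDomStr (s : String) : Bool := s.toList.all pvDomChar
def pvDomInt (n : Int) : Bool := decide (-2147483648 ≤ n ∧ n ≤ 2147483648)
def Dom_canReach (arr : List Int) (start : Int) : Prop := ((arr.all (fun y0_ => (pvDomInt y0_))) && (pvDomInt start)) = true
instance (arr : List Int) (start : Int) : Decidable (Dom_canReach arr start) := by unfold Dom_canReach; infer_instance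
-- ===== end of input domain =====

-- Header: B replaces A's recursive dfs by a flat iterative walk (simpler, no call stack).
-- Both Pythons mutate `arr` in place identically (negation marks); equivalence here is about the return value.
-- Reads use PySem.List.pyGet? with default 0: every read in a run admitted by Pre_ is at a valid
-- non-negative index (index 0 on a non-empty list, or a neighbour guarded by 0 <= neigh < N),
-- so the default is never consulted there.

-- ===== PORT A =====
-- shared tiny accessors for reading/writing arr[i] at a known-in-range i
def pvAt (arr : List Int) (i : Int) : Int := (PySem.List.pyGet? arr i).getD 0
def pvSet (arr : List Int) (i v : Int) : List Int := arr.set i.toNat v  -- i ≥ 0 at every use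

mutual
-- dfs(idx): fuel only guards totality; 2*N+2 is never exhausted (each index is entered at most twice)
def canReachDfs (fuel : Nat) (n : Nat) (arr : List Int) (idx : Int) : Bool :=
  match fuel with
  | 0 => false
  | f + 1 =>
    if pvAt arr idx = 0 then true
    else
      -- arr[idx] = -arr[idx]; after the assignment arr[idx] is this value a
      let a := -(pvAt arr idx)
      let arr' := pvSet arr idx a
      -- for neigh in [idx+arr[idx], idx-arr[idx]]:
      canReachFor f n arr' [idx + a, idx - a]
termination_by (fuel, 0)
-- the body of A's for-loop over the neighbour list, with its early returns
def canReachFor (f : Nat) (n : Nat) (arr : List Int) (neighs : List Int) : Bool :=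
  match neighs with
  | [] => false
  | neigh :: rest =>
    if 0 ≤ neigh ∧ neigh < (n : Int) then
      if 0 ≤ pvAt arr neigh then
        (if canReachDfs f n arr neigh then true else false)
      else canReachFor f n arr rest
    else canReachFor f n arr rest
termination_by (f, neighs.length)
end

def canReach (arr : List Int) (start : Int) : Bool :=
  canReachDfs (2 * arr.length + 2) arr.length arr 0

-- ===== PORT B =====
-- iterative walk: single index, commit to the first valid neighbour; fuel guards totality only
def canReachLoop (fuel : Nat) (n : Nat) (arr : List Int) (idx : Int) : Bool :=
  match fuel with
  | 0 => false
  | f + 1 =>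
    if pvAt arr idx = 0 then true
    else
      let v := -(pvAt arr idx)
      let arr' := pvSet arr idx v
      if 0 ≤ idx + v ∧ idx + v < (n : Int) ∧ 0 ≤ pvAt arr' (idx + v) then
        canReachLoop f n arr' (idx + v)
      else if 0 ≤ idx - v ∧ idx - v < (n : Int) ∧ 0 ≤ pvAt arr' (idx - v) then
        canReachLoop f n arr' (idx - v)
      else false

def canReach_alt (arr : List Int) (start : Int) : Bool :=
  canReachLoop (2 * arr.length + 2) arr.length arr 0

-- ===== PRECONDITION & SPEC =====
-- Pre_ excludes only the empty list, on which both Pythons raise IndexError at arr[0].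
def Pre_canReach (arr : List Int) (start : Int) : Prop := arr ≠ []
instance (arr : List Int) (start : Int) : Decidable (Pre_canReach arr start) := by
  unfold Pre_canReach; infer_instance

def pvWitness_canReach : List Int × Int := ([3, 0, 2, 1, 2], 5)

def Spec_canReach (arr : List Int) (start : Int) (out : Bool) : Prop := out = canReach_alt arr start
instance (arr : List Int) (start : Int) (out : Bool) : Decidable (Spec_canReach arr start out) := by
  unfold Spec_canReach; infer_instance

-- ===== CLAIM (what is proved, stated in full; the proofs are below) =====
def Claim_equal_canReach : Prop := ∀ (arr : List Int) (start : Int), Dom_canReach arr start → Pre_canReach arr start → Spec_canReach arr start (canReach arr start)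

-- ===== LEMMAS AND PROOFS =====

lemma if_id_bool (b : Bool) : (if b = true then true else false) = b := by cases b <;> rfl

lemma dfs_eq_loop (fuel : Nat) : ∀ (n : Nat) (arr : List Int) (idx : Int),
    canReachDfs fuel n arr idx = canReachLoop fuel n arr idx := by
  induction fuel with
  | zero => intro n arr idx; simp [canReachDfs, canReachLoop]
  | succ f ih =>
    intro n arr idx
    rw [canReachDfs, canReachLoop]
    by_cases h0 : pvAt arr idx = 0
    · rw [if_pos h0, if_pos h0]
    · rw [if_neg h0, if_neg h0]
      rw [canReachFor, canReachFor, canReachFor]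
      simp only [ih, if_id_bool]
      split_ifs <;> first | rfl | tauto

-- ===== VERDICT (by name: the statement is the Claim_ definition above) =====
theorem canReach_spec : Claim_equal_canReach := by
  intro arr start _ _
  unfold Spec_canReach canReach canReach_alt
  exact dfs_eq_loop _ _ _ _
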